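-- pv_equiv track=rewrite | github.com/serdeshnow/tulahack-2026 | backend/src/tula_ml/lmstudio.py | _find_compact_subsequence
-- ===== SOURCE A (Python) =====
-- def _find_compact_subsequence(compact_words: list[str], compact_candidate: str) -> tuple[int, int] | None:
--     best: tuple[int, int] | None = None
--     for start in range(len(compact_words)):
--         joined = ""
--         for end in range(start, min(len(compact_words), start + 12)):
--             joined += compact_words[end]
--             if joined == compact_candidate:
--                 if best is None or (end - start) > (best[1] - best[0]):
--                     best = (start, end)
--                 break
--             if len(joined) > len(compact_candidate):
--                 break
--     return best
-- ===== SOURCE B (Python) =====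
-- def _find_compact_subsequence(compact_words: list[str], compact_candidate: str) -> tuple[int, int] | None:
--     L = len(compact_candidate)
--     offs = [0]
--     for w in compact_words:
--         offs.append(offs[-1] + len(w))
--     S = "".join(compact_words)
--     n = len(compact_words)
--     best = None
--     for start in range(n):
--         limit = min(n, start + 12)
--         e = next((i for i in range(start, limit) if offs[i + 1] - offs[start] >= L), None)
--         if e is not None and offs[e + 1] - offs[start] == L and S[offs[start]:offs[e + 1]] == compact_candidate:
--             if best is None or (e - start) > (best[1] - best[0]):
--                 best = (start, e)
--     return best
-- ===== Notes on version B (the rewrite author's own statement) =====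
-- stated objective: alternative
-- what changed: Replaces incremental string concatenation and repeated full-string comparisons per start with precomputed prefix-length offsets and one joined string: per start it finds by O(1) length arithmetic the unique window end whose cumulative length reaches the candidate's, and does a single slice comparison there.
import Mathlib
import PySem

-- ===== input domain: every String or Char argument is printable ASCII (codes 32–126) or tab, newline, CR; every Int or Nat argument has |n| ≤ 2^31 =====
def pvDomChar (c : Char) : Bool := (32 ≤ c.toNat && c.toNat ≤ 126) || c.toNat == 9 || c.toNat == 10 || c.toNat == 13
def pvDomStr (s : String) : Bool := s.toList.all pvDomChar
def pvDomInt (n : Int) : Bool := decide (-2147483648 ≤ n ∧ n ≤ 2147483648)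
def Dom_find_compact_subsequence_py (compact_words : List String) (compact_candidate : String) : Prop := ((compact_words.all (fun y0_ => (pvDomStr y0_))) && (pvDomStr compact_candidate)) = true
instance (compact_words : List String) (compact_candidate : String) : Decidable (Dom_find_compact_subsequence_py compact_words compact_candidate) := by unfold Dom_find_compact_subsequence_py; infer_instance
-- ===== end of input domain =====

-- B replaces A's per-start incremental string building and repeated full comparisons by
-- precomputed prefix-length offsets plus one joined string, doing a single slice comparison
-- per start (objective: alternative; same asymptotic class on these inputs).

-- ===== PORT A =====
-- inner `for end in range(start, min(n, start+12))` loop of A, with its two breaks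
def pvAGo (c : List Char) (ws : List (List Char)) (start : Nat) (best : Option (Int × Int)) :
    List Char → List Nat → Option (Int × Int)
  | _, [] => best
  | joined, e :: rest =>
    let j := joined ++ ws.getD e []
    if j = c then
      match best with
      | none => some ((start : Int), (e : Int))
      | some (bs, be) => if be - bs < (e : Int) - (start : Int) then some ((start : Int), (e : Int)) else some (bs, be)
    else if c.length < j.length then best
    else pvAGo c ws start best j rest

def find_compact_subsequence_py (compact_words : List String) (compact_candidate : String) : Option (Int × Int) :=
  let ws := compact_words.map String.toList
  let c := compact_candidate.toList
  let n := ws.length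
  (List.range n).foldl (fun best start =>
    pvAGo c ws start best [] (List.range' start (min n (start + 12) - start))) none

-- ===== PORT B =====
def find_compact_subsequence_py_alt (compact_words : List String) (compact_candidate : String) : Option (Int × Int) :=
  let ws := compact_words.map String.toList
  let c := compact_candidate.toList
  let L := c.length
  let offs := List.scanl (fun a w => a + w.length) 0 ws   -- prefix length offsets
  let S := ws.flatten                                      -- "".join(compact_words)
  let n := ws.length
  (List.range n).foldl (fun best start =>
    let limit := min n (start + 12)
    match (List.range' start (limit - start)).find?
        (fun i => decide (L ≤ offs.getD (i + 1) 0 - offs.getD start 0)) with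
    | none => best
    | some e =>
      if offs.getD (e + 1) 0 - offs.getD start 0 = L ∧
          (S.drop (offs.getD start 0)).take (offs.getD (e + 1) 0 - offs.getD start 0) = c then
        match best with
        | none => some ((start : Int), (e : Int))
        | some (bs, be) => if be - bs < (e : Int) - (start : Int) then some ((start : Int), (e : Int)) else some (bs, be)
      else best) none

-- ===== PRECONDITION & SPEC =====
def Spec_find_compact_subsequence_py (compact_words : List String) (compact_candidate : String) (out : Option (Int × Int)) : Prop := out = find_compact_subsequence_py_alt compact_words compact_candidate
instance (compact_words : List String) (compact_candidate : String) (out : Option (Int × Int)) : Decidable (Spec_find_compact_subsequence_py compact_words compact_candidate out) := by unfold Spec_find_compact_subsequence_py; infer_instance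

-- ===== CLAIM (what is proved, stated in full; the proofs are below) =====
def Claim_equal_find_compact_subsequence_py : Prop := ∀ (compact_words : List String) (compact_candidate : String), Dom_find_compact_subsequence_py compact_words compact_candidate → Spec_find_compact_subsequence_py compact_words compact_candidate (find_compact_subsequence_py compact_words compact_candidate)

-- ===== LEMMAS AND PROOFS =====

def pvOff (ws : List (List Char)) (i : Nat) : Nat := ((ws.take i).map List.length).sum

def pvJ (ws : List (List Char)) (start m : Nat) : List Char := ((ws.drop start).take (m - start)).flatten

def pvUpd (best : Option (Int × Int)) (start e : Nat) : Option (Int × Int) :=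
  match best with
  | none => some ((start : Int), (e : Int))
  | some (bs, be) => if be - bs < (e : Int) - (start : Int) then some ((start : Int), (e : Int)) else some (bs, be)

lemma pvScanl_getD : ∀ (ws : List (List Char)) (a i : Nat), i ≤ ws.length →
    (List.scanl (fun acc w => acc + w.length) a ws).getD i 0 = a + ((ws.take i).map List.length).sum := by
  intro ws
  induction ws with
  | nil =>
    intro a i hi
    have : i = 0 := by simpa using hi
    subst this
    simp [List.scanl_nil]
  | cons w t ih =>
    intro a i hi
    cases i with
    | zero => simp [List.scanl_cons]
    | succ k =>
      rw [List.scanl_cons, List.getD_cons_succ, ih (a + w.length) k (by simpa using hi),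
        List.take_succ_cons]
      simp only [List.map_cons, List.sum_cons]
      omega

lemma pvOff_getD (ws : List (List Char)) (i : Nat) (h : i ≤ ws.length) :
    (List.scanl (fun a w => a + w.length) 0 ws).getD i 0 = pvOff ws i := by
  simpa [pvOff] using pvScanl_getD ws 0 i h

lemma pvOff_split (ws : List (List Char)) (start m : Nat) (h : start ≤ m) :
    pvOff ws m = pvOff ws start + (pvJ ws start m).length := by
  unfold pvOff pvJ
  rw [List.length_flatten]
  have h2 : List.take m ws = List.take start ws ++ List.take (m - start) (List.drop start ws) := by
    conv_lhs => rw [show m = start + (m - start) by omega]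
    exact List.take_add
  rw [h2, List.map_append, List.sum_append]

lemma pvJ_succ (ws : List (List Char)) (start e : Nat) (hse : start ≤ e) (hen : e < ws.length) :
    pvJ ws start (e + 1) = pvJ ws start e ++ ws.getD e [] := by
  unfold pvJ
  have h1 : e + 1 - start = (e - start) + 1 := by omega
  rw [h1, List.take_add_one, List.flatten_append]
  congr 1
  have h2 : (List.drop start ws)[e - start]? = some ws[e] := by
    rw [List.getElem?_drop]
    have h3 : start + (e - start) = e := by omega
    rw [h3, List.getElem?_eq_getElem hen]
  rw [h2]
  simp [List.getD, List.getElem?_eq_getElem hen]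

lemma pvSlice (ws : List (List Char)) (start m : Nat) (hs : start ≤ m) :
    (ws.flatten.drop (pvOff ws start)).take (pvOff ws m - pvOff ws start) = pvJ ws start m := by
  have hsplit : ws.flatten = (ws.take start).flatten ++ (ws.drop start).flatten := by
    rw [← List.flatten_append, List.take_append_drop]
  have hlen : (ws.take start).flatten.length = pvOff ws start := by
    simp [pvOff, List.length_flatten]
  have hdiff : pvOff ws m - pvOff ws start = (pvJ ws start m).length := by
    have := pvOff_split ws start m hs; omega
  have hrest : (ws.drop start).flatten =
      pvJ ws start m ++ ((ws.drop start).drop (m - start)).flatten := by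
    unfold pvJ
    rw [← List.flatten_append, List.take_append_drop]
  rw [hsplit, show pvOff ws start = (ws.take start).flatten.length from hlen.symm,
    List.drop_left, hlen, hdiff, hrest, List.take_left]

lemma pvAGo_dead (c : List Char) (ws : List (List Char)) (start : Nat) (best : Option (Int × Int)) :
    ∀ (l : List Nat) (joined : List Char), joined ≠ c → c.length ≤ joined.length →
      pvAGo c ws start best joined l = best := by
  intro l
  induction l with
  | nil => intro joined _ _; simp [pvAGo]
  | cons e rest ih =>
    intro joined hne hlen
    simp only [pvAGo]
    set w := ws.getD e [] with hwdef
    have hne' : joined ++ w ≠ c := by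
      intro h
      have hl : joined.length + w.length = c.length := by
        simpa using congrArg List.length h
      have hw0 : w = [] := List.length_eq_zero_iff.mp (by omega)
      rw [hw0, List.append_nil] at h
      exact hne h
    rw [if_neg hne']
    by_cases h2 : c.length < (joined ++ w).length
    · rw [if_pos h2]
    · rw [if_neg h2]
      have hw : w = [] := by
        apply List.length_eq_zero_iff.mp
        have := le_of_not_gt h2
        rw [List.length_append] at this
        omega
      rw [hw, List.append_nil]
      exact ih joined hne hlen

lemma pvMain (c : List Char) (ws : List (List Char)) (start : Nat) :
    ∀ (m e : Nat) (best : Option (Int × Int)) (joined : List Char),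
      start ≤ e → e + m ≤ ws.length → joined = pvJ ws start e →
      pvAGo c ws start best joined (List.range' e m) =
        (match (List.range' e m).find? (fun i => decide (c.length ≤ pvOff ws (i + 1) - pvOff ws start)) with
         | none => best
         | some e' =>
           if pvOff ws (e' + 1) - pvOff ws start = c.length ∧
               (ws.flatten.drop (pvOff ws start)).take (pvOff ws (e' + 1) - pvOff ws start) = c
           then pvUpd best start e' else best) := by
  intro m
  induction m with
  | zero => intro e best joined _ _ _; simp [pvAGo]
  | succ m ih =>
    intro e best joined hse hlen hj
    have hen : e < ws.length := by omega
    have hJsucc := pvJ_succ ws start e hse hen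
    have hoffdiff : pvOff ws (e + 1) - pvOff ws start = (pvJ ws start (e + 1)).length := by
      have := pvOff_split ws start (e + 1) (by omega); omega
    have hslice := pvSlice ws start (e + 1) (by omega)
    have hlenrel : (joined ++ ws.getD e []).length = pvOff ws (e + 1) - pvOff ws start := by
      rw [hoffdiff, hJsucc, ← hj]
    rw [List.range'_succ]
    simp only [pvAGo]
    by_cases hc : joined ++ ws.getD e [] = c
    · have hp : decide (c.length ≤ pvOff ws (e + 1) - pvOff ws start) = true := by
        simp only [decide_eq_true_iff]
        rw [hoffdiff, hJsucc, ← hj, hc]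
      rw [if_pos hc, List.find?_cons_of_pos (p := fun i => decide (c.length ≤ pvOff ws (i + 1) - pvOff ws start)) hp]
      have hcond : pvOff ws (e + 1) - pvOff ws start = c.length ∧
          (ws.flatten.drop (pvOff ws start)).take (pvOff ws (e + 1) - pvOff ws start) = c := by
        refine ⟨?_, ?_⟩
        · rw [hoffdiff, hJsucc, ← hj, hc]
        · rw [hslice, hJsucc, ← hj, hc]
      dsimp only
      rw [if_pos hcond]
      rfl
    · by_cases hlt : c.length < (joined ++ ws.getD e []).length
      · have hp : decide (c.length ≤ pvOff ws (e + 1) - pvOff ws start) = true := by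
          simp only [decide_eq_true_iff]; omega
        rw [if_neg hc, if_pos hlt, List.find?_cons_of_pos (p := fun i => decide (c.length ≤ pvOff ws (i + 1) - pvOff ws start)) hp]
        dsimp only
        rw [if_neg (by rintro ⟨h1, _⟩; omega)]
      · by_cases heq : (joined ++ ws.getD e []).length = c.length
        · have hp : decide (c.length ≤ pvOff ws (e + 1) - pvOff ws start) = true := by
            simp only [decide_eq_true_iff]; omega
          rw [if_neg hc, if_neg hlt, List.find?_cons_of_pos (p := fun i => decide (c.length ≤ pvOff ws (i + 1) - pvOff ws start)) hp]
          dsimp only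
          rw [if_neg (by
            rintro ⟨_, h2⟩
            rw [hslice, hJsucc, ← hj] at h2
            exact hc h2)]
          exact pvAGo_dead c ws start best _ _ hc (by omega)
        · have hp : ¬ decide (c.length ≤ pvOff ws (e + 1) - pvOff ws start) = true := by
            simp only [decide_eq_true_iff]; omega
          rw [if_neg hc, if_neg hlt, List.find?_cons_of_neg (p := fun i => decide (c.length ≤ pvOff ws (i + 1) - pvOff ws start)) hp]
          exact ih (e + 1) best _ (by omega) (by omega) (by rw [hJsucc, ← hj])

lemma pvFind?_congr_mem {α : Type} (l : List α) (p q : α → Bool) (h : ∀ x ∈ l, p x = q x) :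
    l.find? p = l.find? q := by
  induction l with
  | nil => rfl
  | cons a t ih =>
    simp only [List.find?]
    rw [h a (by simp)]
    cases q a
    · exact ih (fun x hx => h x (by simp [hx]))
    · rfl

lemma pvStep (c : List Char) (ws : List (List Char)) (best : Option (Int × Int)) (start : Nat)
    (hs : start < ws.length) :
    pvAGo c ws start best [] (List.range' start (min ws.length (start + 12) - start)) =
      (match (List.range' start (min ws.length (start + 12) - start)).find?
          (fun i => decide (c.length ≤ (List.scanl (fun a w => a + w.length) 0 ws).getD (i + 1) 0
            - (List.scanl (fun a w => a + w.length) 0 ws).getD start 0)) with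
       | none => best
       | some e =>
         if (List.scanl (fun a w => a + w.length) 0 ws).getD (e + 1) 0
              - (List.scanl (fun a w => a + w.length) 0 ws).getD start 0 = c.length ∧
             (ws.flatten.drop ((List.scanl (fun a w => a + w.length) 0 ws).getD start 0)).take
                ((List.scanl (fun a w => a + w.length) 0 ws).getD (e + 1) 0
                  - (List.scanl (fun a w => a + w.length) 0 ws).getD start 0) = c then
           match best with
           | none => some ((start : Int), (e : Int))
           | some (bs, be) => if be - bs < (e : Int) - (start : Int) then some ((start : Int), (e : Int)) else some (bs, be)
         else best) := by
  have hl2 : min ws.length (start + 12) ≤ ws.length := Nat.min_le_left _ _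
  have hmain := pvMain c ws start (min ws.length (start + 12) - start) start best []
    (le_refl start) (by omega) (by simp [pvJ])
  rw [hmain]
  have hfind : (List.range' start (min ws.length (start + 12) - start)).find?
      (fun i => decide (c.length ≤ pvOff ws (i + 1) - pvOff ws start)) =
    (List.range' start (min ws.length (start + 12) - start)).find?
      (fun i => decide (c.length ≤ (List.scanl (fun a w => a + w.length) 0 ws).getD (i + 1) 0
        - (List.scanl (fun a w => a + w.length) 0 ws).getD start 0)) := by
    apply pvFind?_congr_mem
    intro i hi
    rw [List.mem_range'_1] at hi
    rw [pvOff_getD ws (i + 1) (by omega), pvOff_getD ws start (by omega)]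
  rw [hfind]
  cases hf : (List.range' start (min ws.length (start + 12) - start)).find?
      (fun i => decide (c.length ≤ (List.scanl (fun a w => a + w.length) 0 ws).getD (i + 1) 0
        - (List.scanl (fun a w => a + w.length) 0 ws).getD start 0)) with
  | none => rfl
  | some e =>
    have he : e ∈ List.range' start (min ws.length (start + 12) - start) :=
      List.mem_of_find?_eq_some hf
    rw [List.mem_range'_1] at he
    dsimp only
    rw [pvOff_getD ws (e + 1) (by omega), pvOff_getD ws start (by omega)]
    rfl

lemma pvPorts_eq (compact_words : List String) (compact_candidate : String) :
    find_compact_subsequence_py compact_words compact_candidate =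
      find_compact_subsequence_py_alt compact_words compact_candidate := by
  unfold find_compact_subsequence_py find_compact_subsequence_py_alt
  apply PySem.List.foldl_congr_mem
  intro best start hstart
  rw [List.mem_range] at hstart
  exact pvStep (compact_candidate.toList) (compact_words.map String.toList) best start hstart

-- ===== VERDICT (by name: the statement is the Claim_ definition above) =====
theorem find_compact_subsequence_py_spec : Claim_equal_find_compact_subsequence_py := by
  intro compact_words compact_candidate _
  unfold Spec_find_compact_subsequence_py
  exact pvPorts_eq compact_words compact_candidate
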